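-- pv_equiv track=rewrite | github.com/sorachang1874/Sourcing-AI-Agent-Dev | sourcing-ai-agent/src/sourcing_agent/domain.py | normalize_requested_facet
-- ===== SOURCE A (Python) =====
-- from typing import Any
--
-- def _clean(value: Any) -> str:
--     if value is None:
--         return ""
--     return str(value).strip()
--
-- FACET_ALIAS_MAP = {
--     "investor": {"investor", "investment"},
--     "founding": {"founding", "founder", "cofounder", "co-founder"},
--     "leadership": {"leadership", "leader", "head", "director", "vp", "vice president", "chief"},
--     "recruiting": {"recruiting", "recruiter", "talent", "talent acquisition"},
--     "ops": {"ops", "operations", "business operations", "people operations", "programs", "chief of staff"},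
--     "product_management": {"product_management", "product management", "product manager", "产品经理", "pm"},
--     "infra_systems": {"infra_systems", "infra", "infrastructure", "systems", "platform", "distributed systems"},
--     "research": {"research", "researcher", "scientist", "applied scientist"},
--     "engineering": {"engineering", "engineer", "technical staff", "member of technical staff"},
--     "multimodal": {"multimodal", "multimodality", "vision-language", "vision language"},
--     "safety": {"safety", "alignment", "evals", "evaluation"},
--     "training": {"training", "pretraining", "pre-training", "post-training", "reinforcement learning"},
--     "inference": {"inference", "serving", "runtime", "decoding"},
--     "data": {"data", "data systems", "data platform", "datasets"},
--     "greater_china_region_experience": {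
--         "greater_china_region_experience",
--         "greater china experience",
--         "greater china region experience",
--         "greater china",
--         "china experience",
--     },
--     "mainland_china_experience_or_chinese_language": {
--         "mainland_china_experience_or_chinese_language",
--         "mainland or chinese language",
--         "mainland china experience",
--         "chinese language signal",
--     },
-- }
--
-- def normalize_requested_facet(value: str) -> str:
--     normalized = _clean(value).lower().replace("-", " ")
--     normalized = " ".join(normalized.replace("_", " ").split())
--     if not normalized:
--         return ""
--     for canonical, aliases in FACET_ALIAS_MAP.items():
--         if normalized == canonical or normalized in aliases:
--             return canonical
--     return normalized.replace(" ", "_")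
-- ===== SOURCE B (Python) =====
-- # Reverse index: one flat literal (alias, canonical) pairs list; setdefault keeps
-- # the first canonical if an alias ever repeats.
-- _ALIAS_PAIRS = [
--     ("investor", "investor"),
--     ("investment", "investor"),
--     ("founding", "founding"),
--     ("founder", "founding"),
--     ("cofounder", "founding"),
--     ("co-founder", "founding"),
--     ("leadership", "leadership"),
--     ("leader", "leadership"),
--     ("head", "leadership"),
--     ("director", "leadership"),
--     ("vp", "leadership"),
--     ("vice president", "leadership"),
--     ("chief", "leadership"),
--     ("recruiting", "recruiting"),
--     ("recruiter", "recruiting"),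
--     ("talent", "recruiting"),
--     ("talent acquisition", "recruiting"),
--     ("ops", "ops"),
--     ("operations", "ops"),
--     ("business operations", "ops"),
--     ("people operations", "ops"),
--     ("programs", "ops"),
--     ("chief of staff", "ops"),
--     ("product_management", "product_management"),
--     ("product management", "product_management"),
--     ("product manager", "product_management"),
--     ("产品经理", "product_management"),
--     ("pm", "product_management"),
--     ("infra_systems", "infra_systems"),
--     ("infra", "infra_systems"),
--     ("infrastructure", "infra_systems"),
--     ("systems", "infra_systems"),
--     ("platform", "infra_systems"),
--     ("distributed systems", "infra_systems"),
--     ("research", "research"),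
--     ("researcher", "research"),
--     ("scientist", "research"),
--     ("applied scientist", "research"),
--     ("engineering", "engineering"),
--     ("engineer", "engineering"),
--     ("technical staff", "engineering"),
--     ("member of technical staff", "engineering"),
--     ("multimodal", "multimodal"),
--     ("multimodality", "multimodal"),
--     ("vision-language", "multimodal"),
--     ("vision language", "multimodal"),
--     ("safety", "safety"),
--     ("alignment", "safety"),
--     ("evals", "safety"),
--     ("evaluation", "safety"),
--     ("training", "training"),
--     ("pretraining", "training"),
--     ("pre-training", "training"),
--     ("post-training", "training"),
--     ("reinforcement learning", "training"),
--     ("inference", "inference"),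
--     ("serving", "inference"),
--     ("runtime", "inference"),
--     ("decoding", "inference"),
--     ("data", "data"),
--     ("data systems", "data"),
--     ("data platform", "data"),
--     ("datasets", "data"),
--     ("greater_china_region_experience", "greater_china_region_experience"),
--     ("greater china experience", "greater_china_region_experience"),
--     ("greater china region experience", "greater_china_region_experience"),
--     ("greater china", "greater_china_region_experience"),
--     ("china experience", "greater_china_region_experience"),
--     ("mainland_china_experience_or_chinese_language", "mainland_china_experience_or_chinese_language"),
--     ("mainland or chinese language", "mainland_china_experience_or_chinese_language"),
--     ("mainland china experience", "mainland_china_experience_or_chinese_language"),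
--     ("chinese language signal", "mainland_china_experience_or_chinese_language"),
-- ]
--
-- _REVERSE = {}
-- for _alias, _canonical in _ALIAS_PAIRS:
--     _REVERSE.setdefault(_alias, _canonical)
--
--
-- def normalize_requested_facet(value: str) -> str:
--     words = []
--     cur = ""
--     for ch in value.lower() + " ":
--         if ch == "-" or ch == "_" or ch.isspace():
--             if cur:
--                 words.append(cur)
--                 cur = ""
--         else:
--             cur += ch
--     if not words:
--         return ""
--     hit = _REVERSE.get(" ".join(words))
--     return hit if hit is not None else "_".join(words)
-- ===== Notes on version B (the rewrite author's own statement) =====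
-- stated objective: alternative
-- what changed: Replaces A's staged normalization pipeline (strip, lower, two replaces, split, join) plus a per-call linear scan of the grouped alias table with a single character-level tokenizer pass over the lowercased input and one lookup in a reverse index dict (alias -> canonical) built once from a flat literal pairs list with setdefault (first canonical wins).
import Mathlib
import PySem

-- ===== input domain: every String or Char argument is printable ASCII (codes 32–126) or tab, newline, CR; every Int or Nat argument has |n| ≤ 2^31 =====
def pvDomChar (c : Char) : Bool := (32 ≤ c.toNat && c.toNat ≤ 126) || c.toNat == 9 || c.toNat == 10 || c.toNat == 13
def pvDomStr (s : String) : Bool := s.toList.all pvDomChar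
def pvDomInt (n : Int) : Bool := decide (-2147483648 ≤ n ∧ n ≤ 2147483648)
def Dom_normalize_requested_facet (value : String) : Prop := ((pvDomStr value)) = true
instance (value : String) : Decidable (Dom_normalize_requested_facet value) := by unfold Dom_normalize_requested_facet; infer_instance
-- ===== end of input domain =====

-- B replaces A's staged replace/strip/split/join pipeline and per-call linear scan of the
-- alias table with a single character-level tokenizer pass and a precomputed reverse index
-- dict (alias → canonical); objective: alternative.

-- ===== PORT A =====
-- Python sets are used for membership tests only, so each alias set is ported as
-- the list of its distinct elements (membership is order-independent, hence exact).
def FACET_ALIAS_MAP : List (String × List String) :=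
  [ ("investor", ["investor", "investment"]),
    ("founding", ["founding", "founder", "cofounder", "co-founder"]),
    ("leadership", ["leadership", "leader", "head", "director", "vp", "vice president", "chief"]),
    ("recruiting", ["recruiting", "recruiter", "talent", "talent acquisition"]),
    ("ops", ["ops", "operations", "business operations", "people operations", "programs", "chief of staff"]),
    ("product_management", ["product_management", "product management", "product manager", "产品经理", "pm"]),
    ("infra_systems", ["infra_systems", "infra", "infrastructure", "systems", "platform", "distributed systems"]),
    ("research", ["research", "researcher", "scientist", "applied scientist"]),
    ("engineering", ["engineering", "engineer", "technical staff", "member of technical staff"]),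
    ("multimodal", ["multimodal", "multimodality", "vision-language", "vision language"]),
    ("safety", ["safety", "alignment", "evals", "evaluation"]),
    ("training", ["training", "pretraining", "pre-training", "post-training", "reinforcement learning"]),
    ("inference", ["inference", "serving", "runtime", "decoding"]),
    ("data", ["data", "data systems", "data platform", "datasets"]),
    ("greater_china_region_experience", ["greater_china_region_experience", "greater china experience", "greater china region experience", "greater china", "china experience"]),
    ("mainland_china_experience_or_chinese_language", ["mainland_china_experience_or_chinese_language", "mainland or chinese language", "mainland china experience", "chinese language signal"]) ]

-- the 'for canonical, aliases in FACET_ALIAS_MAP.items(): if … return canonical' loop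
def facetScan (n : String) : List (String × List String) → String
  | [] => PySem.Str.replace n " " "_"
  | (c, aliases) :: rest => if n = c ∨ n ∈ aliases then c else facetScan n rest

def normalize_requested_facet (value : String) : String :=
  -- _clean(value) = str(value).strip() (value is a str here, never None)
  let n0 := PySem.Str.replace (PySem.Str.lower (PySem.Str.strip value)) "-" " "
  let normalized := PySem.Str.join " " (PySem.Str.split₀ (PySem.Str.replace n0 "_" " "))
  if normalized = "" then "" else facetScan normalized FACET_ALIAS_MAP

-- ===== PORT B =====
-- flat literal (alias, canonical) pairs; _REVERSE built once with setdefault (first wins)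
def pvPairs : List (String × String) :=
  [ ("investor", "investor"),
    ("investment", "investor"),
    ("founding", "founding"),
    ("founder", "founding"),
    ("cofounder", "founding"),
    ("co-founder", "founding"),
    ("leadership", "leadership"),
    ("leader", "leadership"),
    ("head", "leadership"),
    ("director", "leadership"),
    ("vp", "leadership"),
    ("vice president", "leadership"),
    ("chief", "leadership"),
    ("recruiting", "recruiting"),
    ("recruiter", "recruiting"),
    ("talent", "recruiting"),
    ("talent acquisition", "recruiting"),
    ("ops", "ops"),
    ("operations", "ops"),
    ("business operations", "ops"),
    ("people operations", "ops"),
    ("programs", "ops"),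
    ("chief of staff", "ops"),
    ("product_management", "product_management"),
    ("product management", "product_management"),
    ("product manager", "product_management"),
    ("产品经理", "product_management"),
    ("pm", "product_management"),
    ("infra_systems", "infra_systems"),
    ("infra", "infra_systems"),
    ("infrastructure", "infra_systems"),
    ("systems", "infra_systems"),
    ("platform", "infra_systems"),
    ("distributed systems", "infra_systems"),
    ("research", "research"),
    ("researcher", "research"),
    ("scientist", "research"),
    ("applied scientist", "research"),
    ("engineering", "engineering"),
    ("engineer", "engineering"),
    ("technical staff", "engineering"),
    ("member of technical staff", "engineering"),
    ("multimodal", "multimodal"),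
    ("multimodality", "multimodal"),
    ("vision-language", "multimodal"),
    ("vision language", "multimodal"),
    ("safety", "safety"),
    ("alignment", "safety"),
    ("evals", "safety"),
    ("evaluation", "safety"),
    ("training", "training"),
    ("pretraining", "training"),
    ("pre-training", "training"),
    ("post-training", "training"),
    ("reinforcement learning", "training"),
    ("inference", "inference"),
    ("serving", "inference"),
    ("runtime", "inference"),
    ("decoding", "inference"),
    ("data", "data"),
    ("data systems", "data"),
    ("data platform", "data"),
    ("datasets", "data"),
    ("greater_china_region_experience", "greater_china_region_experience"),
    ("greater china experience", "greater_china_region_experience"),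
    ("greater china region experience", "greater_china_region_experience"),
    ("greater china", "greater_china_region_experience"),
    ("china experience", "greater_china_region_experience"),
    ("mainland_china_experience_or_chinese_language", "mainland_china_experience_or_chinese_language"),
    ("mainland or chinese language", "mainland_china_experience_or_chinese_language"),
    ("mainland china experience", "mainland_china_experience_or_chinese_language"),
    ("chinese language signal", "mainland_china_experience_or_chinese_language") ]

def pvReverse : PySem.Dict String String :=
  pvPairs.foldl (fun d p => d.setdefault p.1 p.2) PySem.Dict.empty

-- loop body: (words, cur) accumulator; a separator char flushes cur, others extend it
def pvStep (acc : List (List Char) × List Char) (c : Char) : List (List Char) × List Char :=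
  if c = '-' ∨ c = '_' ∨ PySem.Chars.isspace c then
    (if acc.2 = [] then acc.1 else acc.1 ++ [acc.2], [])
  else (acc.1, acc.2 ++ [c])

def normalize_requested_facet_alt (value : String) : String :=
  -- for ch in value.lower() + " ": the trailing " " flushes the last word
  let st := ((PySem.Str.lower value).toList ++ [' ']).foldl pvStep ([], [])
  if st.1 = [] then ""
  else
    match pvReverse.get? (String.ofList (PySem.Chars.join [' '] st.1)) with
    | some hit => hit
    | none => String.ofList (PySem.Chars.join ['_'] st.1)

-- ===== PRECONDITION & SPEC =====
def Spec_normalize_requested_facet (value : String) (out : String) : Prop := out = normalize_requested_facet_alt value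
instance (value : String) (out : String) : Decidable (Spec_normalize_requested_facet value out) := by unfold Spec_normalize_requested_facet; infer_instance

-- ===== CLAIM (what is proved, stated in full; the proofs are below) =====
def Claim_equal_normalize_requested_facet : Prop := ∀ (value : String), Dom_normalize_requested_facet value → Spec_normalize_requested_facet value (normalize_requested_facet value)

-- ===== LEMMAS AND PROOFS =====

-- the character substitution A's two single-char replaces amount to
def pvSub (c : Char) : Char := if c = '-' then ' ' else if c = '_' then ' ' else c

-- the whitespace-only tokenizer step (pvStep after pvSub)
def pvWStep (acc : List (List Char) × List Char) (c : Char) : List (List Char) × List Char :=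
  if PySem.Chars.isspace c then
    (if acc.2 = [] then acc.1 else acc.1 ++ [acc.2], [])
  else (acc.1, acc.2 ++ [c])

-- first-match lookup in a flat pairs list
def pvAssoc (n : String) : List (String × String) → Option String
  | [] => none
  | p :: rest => if p.1 = n then some p.2 else pvAssoc n rest

-- first-match lookup over the grouped table, as an Option
def facetAssoc (n : String) : List (String × List String) → Option String
  | [] => none
  | (c, aliases) :: rest => if n = c ∨ n ∈ aliases then some c else facetAssoc n rest

lemma replace_go_single (a b : Char) (s acc : List Char) (fuel : Nat) (h : s.length ≤ fuel) :
    PySem.Chars.replace.go [a] [b] fuel s acc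
      = acc.reverse ++ s.map (fun c => if c = a then b else c) := by
  induction s generalizing acc fuel with
  | nil => cases fuel <;> simp [PySem.Chars.replace.go]
  | cons c t ih =>
      cases fuel with
      | zero => simp at h
      | succ m =>
        simp only [PySem.Chars.replace.go]
        by_cases hc : c = a
        · subst hc
          simp only [List.isPrefixOf, BEq.rfl, Bool.true_and, if_true,
            List.length_cons, List.drop_succ_cons, List.length_nil, List.drop_zero]
          rw [ih _ _ (by simpa using h)]
          simp
        · have hpre : List.isPrefixOf [a] (c :: t) = false := by
            simp only [List.isPrefixOf, Bool.and_true]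
            exact beq_eq_false_iff_ne.mpr fun hh => hc hh.symm
          rw [hpre]
          simp only [Bool.false_eq_true, if_false]
          rw [ih _ _ (by simpa using h)]
          simp [hc]

lemma replace_single (a b : Char) (s : List Char) :
    PySem.Chars.replace s [a] [b] = s.map (fun c => if c = a then b else c) := by
  simp [PySem.Chars.replace, replace_go_single a b s [] s.length le_rfl]

lemma foldl_pvWStep_shift (t : List Char) (ws : List (List Char)) (cur : List Char) :
    (t.foldl pvWStep (ws, cur)).1 = ws ++ (t.foldl pvWStep ([], cur)).1 := by
  induction t generalizing ws cur with
  | nil => simp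
  | cons c rest ih =>
      simp only [List.foldl_cons, pvWStep]
      by_cases hs : PySem.Chars.isspace c = true
      · simp only [hs, if_true]
        split_ifs with hc
        · exact ih ws []
        · rw [ih (ws ++ [cur]) [], ih ([] ++ [cur]) []]
          simp
      · simp only [hs]
        exact ih ws (cur ++ [c])

lemma split₀_go_eq_fold (s : List Char) : ∀ (cur : List Char) (ws : List (List Char)),
    PySem.Chars.split₀.go s cur ws
      = ws.reverse ++ ((s ++ [' ']).foldl pvWStep ([], cur.reverse)).1 := by
  induction s with
  | nil =>
      intro cur ws
      have hsp : PySem.Chars.isspace ' ' = true := by decide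
      simp only [PySem.Chars.split₀.go, List.nil_append, List.foldl_cons, List.foldl_nil, pvWStep,
        hsp, if_true]
      by_cases hc : cur = []
      · simp [hc]
      · rw [if_neg (by simpa [List.isEmpty_iff] using hc), if_neg (by simpa using hc)]
        simp
  | cons c rest ih =>
      intro cur ws
      simp only [PySem.Chars.split₀.go]
      by_cases hs : PySem.Chars.isspace c = true
      · simp only [hs, if_true, List.cons_append, List.foldl_cons]
        rw [show pvWStep ([], cur.reverse) c
              = ((if cur.reverse = [] then ([] : List (List Char)) else [cur.reverse]), []) by
            simp [pvWStep, hs]]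
        by_cases hc : cur = []
        · simp only [hc, List.isEmpty_nil, if_true, List.reverse_nil, ih]
        · rw [if_neg (by simpa [List.isEmpty_iff] using hc),
              if_neg (by simpa using hc), ih]
          rw [foldl_pvWStep_shift (rest ++ [' ']) [cur.reverse] []]
          simp
      · simp only [hs, Bool.false_eq_true, if_false]
        rw [ih]
        simp only [List.reverse_cons, List.cons_append, List.foldl_cons]
        rw [show pvWStep ([], cur.reverse) c = ([], cur.reverse ++ [c]) by simp [pvWStep, hs]]

lemma split₀_eq_fold (s : List Char) :
    PySem.Chars.split₀ s = ((s ++ [' ']).foldl pvWStep ([], [])).1 := by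
  simpa using split₀_go_eq_fold s [] []

lemma pvStep_eq_wstep (acc : List (List Char) × List Char) (c : Char) :
    pvStep acc c = pvWStep acc (pvSub c) := by
  unfold pvStep pvWStep pvSub
  by_cases h1 : c = '-'
  · simp [h1]; decide
  · by_cases h2 : c = '_'
    · simp [h2]; decide
    · simp [h1, h2]

lemma foldl_pvStep_eq (s : List Char) (st : List (List Char) × List Char) :
    s.foldl pvStep st = (s.map pvSub).foldl pvWStep st := by
  rw [List.foldl_map]
  exact PySem.List.foldl_congr_mem s _ _ st fun acc c _ => pvStep_eq_wstep acc c

lemma isspace_not_upper {c : Char} (h : PySem.Chars.isspace c = true) :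
    PySem.Chars.isupper c = false := by
  simp only [PySem.Chars.isspace, PySem.Chars.isupper, Bool.or_eq_true, Bool.and_eq_true,
    decide_eq_true_eq, Char.le_def] at *
  simp only [Bool.and_eq_false_iff, decide_eq_false_iff_not, UInt32.le_iff_toNat_le]
  have : ('A'.val.toNat = 65) ∧ ('Z'.val.toNat = 90) := by decide
  unfold Char.toNat at h
  omega

lemma isspace_fix_lower {c : Char} (h : PySem.Chars.isspace c = true) :
    PySem.Chars.lowerChar c = c := by
  simp [PySem.Chars.lowerChar, isspace_not_upper h]

lemma isspace_fix_sub {c : Char} (h : PySem.Chars.isspace c = true) : pvSub c = c := by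
  unfold pvSub
  split_ifs with h1 h2
  · subst h1; simp [PySem.Chars.isspace] at h
  · subst h2; simp [PySem.Chars.isspace] at h
  · rfl

lemma split₀_cons_space (c : Char) (s : List Char) (h : PySem.Chars.isspace c = true) :
    PySem.Chars.split₀ (c :: s) = PySem.Chars.split₀ s := by
  show PySem.Chars.split₀.go (c :: s) [] [] = PySem.Chars.split₀.go s [] []
  simp [PySem.Chars.split₀.go, h]

lemma split₀_space_prefix (p s : List Char) (h : ∀ c ∈ p, PySem.Chars.isspace c = true) :
    PySem.Chars.split₀ (p ++ s) = PySem.Chars.split₀ s := by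
  induction p with
  | nil => rfl
  | cons c t ih =>
      rw [List.cons_append, split₀_cons_space _ _ (h c (by simp)),
        ih fun c hc => h c (by simp [hc])]

lemma foldl_pvWStep_spaces (q : List Char) (w : List (List Char))
    (h : ∀ c ∈ q, PySem.Chars.isspace c = true) :
    q.foldl pvWStep (w, []) = (w, []) := by
  induction q with
  | nil => rfl
  | cons c t ih =>
      rw [List.foldl_cons, show pvWStep (w, []) c = (w, []) by simp [pvWStep, h c (by simp)],
        ih fun c hc => h c (by simp [hc])]

lemma split₀_space_suffix (s q : List Char) (h : ∀ c ∈ q, PySem.Chars.isspace c = true) :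
    PySem.Chars.split₀ (s ++ q) = PySem.Chars.split₀ s := by
  rw [split₀_eq_fold, split₀_eq_fold, List.append_assoc, List.foldl_append, List.foldl_append]
  cases q with
  | nil => simp
  | cons c t =>
      have hsp : PySem.Chars.isspace ' ' = true := by decide
      have hstep : ∀ st : List (List Char) × List Char, ∀ d, PySem.Chars.isspace d = true →
          pvWStep st d = (if st.2 = [] then st.1 else st.1 ++ [st.2], []) := by
        intro st d hd; simp [pvWStep, hd]
      rw [List.foldl_cons (a := c), hstep _ c (h c (by simp)),
        foldl_pvWStep_spaces t _ (fun c hc => h c (by simp [hc]))]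
      simp only [List.foldl_cons, List.foldl_nil]
      rw [hstep _ ' ' hsp, List.foldl_append]
      simp only [List.foldl_cons, List.foldl_nil]
      rw [hstep _ ' ' hsp]
      simp

lemma words_good (s : List Char) (ws : List (List Char)) (cur : List Char)
    (hws : ∀ w ∈ ws, w ≠ [] ∧ ' ' ∉ w) (hcur : ' ' ∉ cur) :
    ∀ w ∈ (s.foldl pvWStep (ws, cur)).1, w ≠ [] ∧ ' ' ∉ w := by
  induction s generalizing ws cur with
  | nil => exact hws
  | cons c t ih =>
      rw [List.foldl_cons]
      unfold pvWStep
      split_ifs with h1 h2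
      · exact ih ws [] hws (by simp)
      · refine ih (ws ++ [cur]) [] ?_ (by simp)
        intro w hw
        rcases List.mem_append.mp hw with hw | hw
        · exact hws w hw
        · simp only [List.mem_singleton] at hw
          exact hw ▸ ⟨h2, hcur⟩
      · refine ih ws (cur ++ [c]) hws ?_
        have hc : c ≠ ' ' := fun hc => by
          subst hc; exact h1 (by decide)
        simp [hcur, Ne.symm hc]

lemma join_ne_nil (ws : List (List Char)) (h : ∀ w ∈ ws, w ≠ []) (hne : ws ≠ []) :
    PySem.Chars.join [' '] ws ≠ [] := by
  cases ws with
  | nil => exact (hne rfl).elim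
  | cons w t =>
      cases t with
      | nil => rw [PySem.Chars.join_singleton]; exact h w (by simp)
      | cons v u =>
          rw [PySem.Chars.join_cons_cons]
          have := h w (by simp)
          intro hc
          simp only [List.append_assoc, List.append_eq_nil_iff] at hc
          exact this hc.1

lemma map_join (f : Char → Char) (sep : List Char) (ws : List (List Char)) :
    (PySem.Chars.join sep ws).map f = PySem.Chars.join (sep.map f) (ws.map (List.map f)) := by
  induction ws with
  | nil => simp [PySem.Chars.join_nil]
  | cons w t ih =>
      cases t with
      | nil => simp [PySem.Chars.join_singleton]
      | cons v u =>
          simp only [PySem.Chars.join_cons_cons, List.map_append, List.map_cons, ih]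

lemma map_id_of_no_space (f : Char → Char) (w : List Char) (hf : ∀ c, c ≠ ' ' → f c = c)
    (h : ' ' ∉ w) : w.map f = w := by
  rw [List.map_congr_left fun c hc => hf c (fun he => h (he ▸ hc))]
  simp

lemma get?_setdefault (d : PySem.Dict String String) (a v n : String) :
    (d.setdefault a v).get? n = (d.get? n).or (if a = n then some v else none) := by
  by_cases hc : d.contains a = true
  · rw [PySem.Dict.setdefault_of_contains d v hc]
    rcases h : d.get? n with _ | w
    · split_ifs with hna
      · subst hna
        rw [PySem.Dict.contains_eq_isSome_get?] at hc
        simp [h] at hc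
      · simp
    · simp
  · rw [PySem.Dict.setdefault_of_not_contains d v (by simpa using hc),
      PySem.Dict.get?_insert]
    have hd : d.get? a = none := by
      rw [PySem.Dict.contains_eq_isSome_get?] at hc
      cases h : d.get? a <;> simp [h] at hc ⊢
    by_cases hna : n = a
    · subst hna; simp [hd]
    · have : ¬ (a = n) := fun h => hna h.symm
      simp [hna, this]

lemma get?_setdefault_fold (pairs : List (String × String)) (d : PySem.Dict String String) (n : String) :
    (pairs.foldl (fun d p => d.setdefault p.1 p.2) d).get? n = (d.get? n).or (pvAssoc n pairs) := by
  induction pairs generalizing d with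
  | nil => simp [pvAssoc]
  | cons p rest ih =>
      simp only [List.foldl_cons, ih, get?_setdefault, Option.or_assoc, pvAssoc]
      congr 1
      by_cases h : p.1 = n <;> simp [h]

lemma pvAssoc_append (n : String) (x y : List (String × String)) :
    pvAssoc n (x ++ y) = (pvAssoc n x).or (pvAssoc n y) := by
  induction x with
  | nil => simp [pvAssoc]
  | cons p rest ih =>
      simp only [List.cons_append, pvAssoc, ih]
      split_ifs <;> simp

lemma pvAssoc_map_const (n c : String) (al : List String) :
    pvAssoc n (al.map (fun a => (a, c))) = if n ∈ al then some c else none := by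
  induction al with
  | nil => simp [pvAssoc]
  | cons a rest ih =>
      simp only [List.map_cons, pvAssoc, ih, List.mem_cons]
      by_cases h1 : a = n <;> by_cases h2 : n ∈ rest <;> simp [h1, h2]
      · exact fun h => (h1 h.symm).elim
lemma facetAssoc_flat (n : String) (t : List (String × List String))
    (h : ∀ p ∈ t, p.1 ∈ p.2) :
    facetAssoc n t = pvAssoc n (t.flatMap (fun p => p.2.map (fun a => (a, p.1)))) := by
  induction t with
  | nil => simp [facetAssoc, pvAssoc]
  | cons p rest ih =>
      obtain ⟨c, al⟩ := p
      have hc : c ∈ al := h (c, al) (by simp)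
      simp only [List.flatMap_cons, facetAssoc, pvAssoc_append, pvAssoc_map_const]
      rw [ih fun p hp => h p (by simp [hp])]
      by_cases hm : n ∈ al
      · simp [hm]
      · have hnc : ¬ (n = c) := fun he => hm (he ▸ hc)
        simp [hm, hnc]

lemma strip_decomp (l : List Char) :
    ∃ p q, l = p ++ PySem.Chars.strip l ++ q
      ∧ (∀ c ∈ p, PySem.Chars.isspace c = true) ∧ (∀ c ∈ q, PySem.Chars.isspace c = true) := by
  refine ⟨l.takeWhile PySem.Chars.isspace,
    ((PySem.Chars.lstrip l).reverse.takeWhile PySem.Chars.isspace).reverse, ?_, ?_, ?_⟩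
  · conv_lhs => rw [← List.takeWhile_append_dropWhile (p := PySem.Chars.isspace) (l := l)]
    rw [List.append_assoc]
    congr 1
    show PySem.Chars.lstrip l = _
    conv_lhs => rw [← List.reverse_reverse (PySem.Chars.lstrip l),
      ← List.takeWhile_append_dropWhile (p := PySem.Chars.isspace)
        (l := (PySem.Chars.lstrip l).reverse)]
    rw [List.reverse_append]
    rfl
  · exact fun c hc => List.mem_takeWhile_imp hc
  · exact fun c hc => List.mem_takeWhile_imp (List.mem_reverse.mp hc)

lemma split₀_map_strip (l : List Char) :
    PySem.Chars.split₀ ((PySem.Chars.strip l).map (fun c => pvSub (PySem.Chars.lowerChar c)))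
      = PySem.Chars.split₀ (l.map (fun c => pvSub (PySem.Chars.lowerChar c))) := by
  obtain ⟨p, q, hl, hp, hq⟩ := strip_decomp l
  conv_rhs => rw [hl]
  rw [List.map_append, List.map_append]
  have hfix : ∀ (r : List Char), (∀ c ∈ r, PySem.Chars.isspace c = true) →
      r.map (fun c => pvSub (PySem.Chars.lowerChar c)) = r := by
    intro r hr
    rw [List.map_congr_left fun c hc => by
      rw [isspace_fix_lower (hr c hc), isspace_fix_sub (hr c hc)]]
    exact List.map_id _
  rw [hfix p hp, hfix q hq, split₀_space_suffix _ _ hq, split₀_space_prefix _ _ hp]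

lemma pvPairs_eq :
    pvPairs = FACET_ALIAS_MAP.flatMap (fun p => p.2.map (fun a => (a, p.1))) := by rfl

lemma facet_canonical_mem : ∀ p ∈ FACET_ALIAS_MAP, p.1 ∈ p.2 := by decide

lemma get?_pvReverse (n : String) :
    pvReverse.get? n = facetAssoc n FACET_ALIAS_MAP := by
  unfold pvReverse
  rw [get?_setdefault_fold, pvPairs_eq, ← facetAssoc_flat n _ facet_canonical_mem]
  rfl

lemma facetScan_eq_assoc (n : String) (t : List (String × List String)) :
    facetScan n t = (facetAssoc n t).getD (PySem.Str.replace n " " "_") := by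
  induction t with
  | nil => simp [facetScan, facetAssoc]
  | cons p rest ih =>
      obtain ⟨c, aliases⟩ := p
      simp only [facetScan, facetAssoc]
      split_ifs <;> simp [ih]

-- ===== VERDICT (by name: the statement is the Claim_ definition above) =====
theorem normalize_requested_facet_spec : Claim_equal_normalize_requested_facet := by
  intro value _
  unfold Spec_normalize_requested_facet normalize_requested_facet normalize_requested_facet_alt
  dsimp only []
  -- both normalizations produce the same word list
  have hM : (PySem.Str.replace
        (PySem.Str.replace (PySem.Str.lower (PySem.Str.strip value)) "-" " ") "_" " ").toList
      = (PySem.Chars.strip value.toList).map (fun c => pvSub (PySem.Chars.lowerChar c)) := by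
    rw [PySem.Str.toList_replace, PySem.Str.toList_replace, PySem.Str.toList_lower,
      PySem.Str.toList_strip]
    rw [show ("-" : String).toList = ['-'] from rfl, show ("_" : String).toList = ['_'] from rfl,
      show (" " : String).toList = [' '] from rfl]
    rw [replace_single, replace_single, PySem.Chars.lower, List.map_map, List.map_map]
    refine List.map_congr_left fun c _ => ?_
    simp only [Function.comp]
    unfold pvSub
    by_cases h1 : PySem.Chars.lowerChar c = '-'
    · simp [h1]
    · by_cases h2 : PySem.Chars.lowerChar c = '_' <;> simp [h1, h2]
  have hB1 : ((PySem.Str.lower value).toList ++ [' ']).foldl pvStep ([], [])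
      = ((value.toList.map (fun c => pvSub (PySem.Chars.lowerChar c)) ++ [' ']).foldl pvWStep ([], [])) := by
    rw [foldl_pvStep_eq, PySem.Str.toList_lower, PySem.Chars.lower, List.map_append,
      List.map_map]
    rfl
  set ws : List (List Char) := (((PySem.Str.lower value).toList ++ [' ']).foldl pvStep ([], [])).1 with hws
  have hwords : ws
      = PySem.Chars.split₀ ((PySem.Str.replace
          (PySem.Str.replace (PySem.Str.lower (PySem.Str.strip value)) "-" " ") "_" " ").toList) := by
    rw [hws, hB1, hM, split₀_map_strip, split₀_eq_fold]
  have hgood : ∀ w ∈ ws, w ≠ [] ∧ ' ' ∉ w := by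
    rw [hws, hB1]
    exact words_good _ _ _ (by simp) (by simp)
  have hnorm : (PySem.Str.join " " (PySem.Str.split₀ (PySem.Str.replace
        (PySem.Str.replace (PySem.Str.lower (PySem.Str.strip value)) "-" " ") "_" " "))).toList
      = PySem.Chars.join [' '] ws := by
    rw [PySem.Str.toList_join, PySem.Str.split₀_map_toList, ← hwords]
    rfl
  by_cases hempty : ws = []
  · have hA0 : PySem.Str.join " " (PySem.Str.split₀ (PySem.Str.replace
        (PySem.Str.replace (PySem.Str.lower (PySem.Str.strip value)) "-" " ") "_" " ")) = "" := by
      rw [String.ext_iff, hnorm, hempty]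
      rfl
    rw [if_pos hA0, if_pos hempty]
  · have hne : ¬ (PySem.Str.join " " (PySem.Str.split₀ (PySem.Str.replace
        (PySem.Str.replace (PySem.Str.lower (PySem.Str.strip value)) "-" " ") "_" " ")) = "") := by
      intro h
      rw [String.ext_iff, hnorm] at h
      exact join_ne_nil ws (fun w hw => (hgood w hw).1) hempty (by simpa using h)
    rw [if_neg hne, if_neg hempty]
    have hkey : String.ofList (PySem.Chars.join [' '] ws)
        = PySem.Str.join " " (PySem.Str.split₀ (PySem.Str.replace
            (PySem.Str.replace (PySem.Str.lower (PySem.Str.strip value)) "-" " ") "_" " ")) := by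
      rw [← hnorm, String.ofList_toList]
    rw [hkey, facetScan_eq_assoc, get?_pvReverse]
    cases hfa : facetAssoc (PySem.Str.join " " (PySem.Str.split₀ (PySem.Str.replace
        (PySem.Str.replace (PySem.Str.lower (PySem.Str.strip value)) "-" " ") "_" " "))) FACET_ALIAS_MAP with
    | some c => rfl
    | none =>
        simp only [Option.getD_none]
        rw [String.ext_iff, PySem.Str.toList_replace, hnorm,
          show (" " : String).toList = [' '] from rfl, show ("_" : String).toList = ['_'] from rfl,
          replace_single, map_join]
        have hid : ws.map (List.map fun c => if c = ' ' then '_' else c) = ws := by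
          refine List.ext_getElem (by simp) fun i h1 h2 => ?_
          simp only [List.getElem_map]
          exact map_id_of_no_space _ _ (fun c hc => if_neg hc) ((hgood ws[i] (by simp)).2)
        rw [hid, String.toList_ofList]
        rfl
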